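-- pv_equiv track=rewrite | github.com/undeadyequ/Speech-Backbones | GradTTS/text/syllable.py | search_syllable_index
-- ===== SOURCE A (Python) =====
-- def search_syllable_index(phones):
--     """
--     Args:
--         phones:  ["", "AH", "", "B", "11", "", "G"]   #  w_space: 11, p_space: ""
--
--     Syllable = (consonant) + vowel + (consonant)
--
--     if words has multiple vowels
--         s1 = (consonant) + vowel
--         s2 = (consonant) + vowel
--         s_last = ()
--
--
--     Returns:
--
--     """
--     vowel = ["AO", "UW", "EH", "AH", "AA", "IY", "IH", "UH", "AE", "AW", "AY", "ER", "EY", "OW", "OY"]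
--
--     # Cluster phones to words
--     phones_by_word = []         # [["", "AH", ""], ["11", "B", "", "AH0", "", "IH, """], ["11","", "AH", "", "G", ""]]
--     start = 0
--     phones = [str(phone) for phone in phones]
--     for i, phone in enumerate(phones):
--         if phone == "11":
--             phones_by_word.append(phones[start:i])
--             start = i
--         if i == len(phones) - 1:
--             phones_by_word.append(phones[start:])
--
--     # split words to syllabels by vowel
--     phones_by_syllabel = []      # [["", "AH", ""], ["11", "B", "", "AH0"], ["", "IH, ""], ["11","", "AH", "", "G", ""]]
--     for i, phones in enumerate(phones_by_word):
--         ## remove digits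
--         phones_rm_digit = []    # ["11", "B", "", "AH0", "", "IH, """] -> [..., "AH", ...]
--         for phone in phones:
--             if len(phone) > 0:
--                 if phone[-1].isdigit():
--                     phones_rm_digit.append(phone[:-1])
--                     continue
--             phones_rm_digit.append(phone)
--         ## index vowel
--         vowel_indexs = [i for i, p in enumerate(phones_rm_digit) if p in vowel]  # -> [3, 5]
--         ## split to syllable by vowel
--         if len(vowel_indexs) <= 1:                           # words with single or no vowel (alphabet, exp: f o r e t !)
--             phones_by_syllabel.append(phones)
--         else:                                                # words with multiple vowels
--             start = 0
--             for j, v_ind in enumerate(vowel_indexs):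
--                 phones_by_syllabel.append(phones[start:v_ind+1])  # Syllable = (consonant) + vowel
--                 start = v_ind + 1
--             if vowel_indexs[-1] < len(phones) - 1:    # if words not end with vowel, add remain consonant
--                 phones_by_syllabel[-1].extend(phones[vowel_indexs[-1]+1:])  # Last Syl = (consonant) + vowel + (consonant)
--
--     syllabel_len = [len(phones) for phones in phones_by_syllabel]
--     syllabel_index = [sum(syllabel_len[:i]) for i in range(len(syllabel_len))]    # [0, 3, 7, 10]
--
--     return syllabel_index
-- ===== SOURCE B (Python) =====
-- def _strip_digit(p):
--     return p[:-1] if p[-1:].isdigit() else p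
--
--
-- def search_syllable_index(phones):
--     vowels = {"AO", "UW", "EH", "AH", "AA", "IY", "IH", "UH", "AE", "AW",
--               "AY", "ER", "EY", "OW", "OY"}
--     phones = [str(p) for p in phones]
--     n = len(phones)
--     if n == 0:
--         return []
--     bounds = [i for i, p in enumerate(phones) if p == "11"]
--     out = []
--     for a, b in zip([0] + bounds, bounds + [n]):
--         out.append(a)
--         vpos = [i for i in range(a, b) if _strip_digit(phones[i]) in vowels]
--         out.extend(v + 1 for v in vpos[:-1])
--     return out
-- ===== Notes on version B (the rewrite author's own statement) =====
-- stated objective: faster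
-- what changed: B never builds the per-word / per-syllable phone lists or re-sums slices: it computes the "11" word boundaries and vowel positions in one pass and emits each syllable's start index directly (word start, then position+1 for every non-final vowel), replacing A's list-of-slices construction and its quadratic sum(lens[:i]) prefix-sum comprehension with a single linear scan.
import Mathlib
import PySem

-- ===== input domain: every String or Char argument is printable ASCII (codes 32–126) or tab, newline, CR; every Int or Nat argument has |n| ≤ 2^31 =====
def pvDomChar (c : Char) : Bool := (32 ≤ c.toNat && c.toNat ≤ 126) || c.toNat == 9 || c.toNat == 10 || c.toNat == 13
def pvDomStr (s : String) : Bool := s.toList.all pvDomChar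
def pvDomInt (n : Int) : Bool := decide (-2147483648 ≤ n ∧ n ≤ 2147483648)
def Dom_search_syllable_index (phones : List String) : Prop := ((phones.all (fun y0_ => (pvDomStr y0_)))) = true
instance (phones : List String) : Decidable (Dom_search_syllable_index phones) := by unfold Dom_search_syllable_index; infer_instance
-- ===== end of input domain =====

-- B emits syllable start indices directly in one linear pass (word boundaries + non-final
-- vowel positions with a running offset) instead of A's list-of-slices construction and
-- quadratic prefix-sum comprehension; objective: faster (asymptotic, O(n) vs O(n + k^2)).


-- ===== PORT A =====
def pvVowelsA : List String :=
  ["AO", "UW", "EH", "AH", "AA", "IY", "IH", "UH", "AE", "AW", "AY", "ER", "EY", "OW", "OY"]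

-- A: phone[:-1] if the phone is nonempty and its last character is a digit, else the phone
def pvRmDigitA (p : String) : String :=
  if 0 < PySem.Str.len p then
    match PySem.Str.pyGet? p (-1) with
    | some c => if PySem.Chars.strIsdigit [c] then PySem.Str.slice p none (some (-1)) else p
    | none => p
  else p

-- A: body of the word-clustering loop (state = (start, phones_by_word))
def pvBodyA (phones : List String) (st : Int × List (List String)) (ip : Int × String) :
    Int × List (List String) :=
  let st1 := if ip.2 = "11" then
      (ip.1, st.2 ++ [PySem.List.slice phones (some st.1) (some ip.1)]) else st
  if ip.1 = PySem.List.len phones - 1 then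
    (st1.1, st1.2 ++ [PySem.List.slice phones (some st1.1) none])
  else st1

def pvWordsA (phones : List String) : List (List String) :=
  ((PySem.List.enumerate phones).foldl (pvBodyA phones) (0, [])).2

-- A: body of the word→syllable loop (one word appended to phones_by_syllabel)
def pvWordA (syl : List (List String)) (w : List String) : List (List String) :=
  let rm := w.map pvRmDigitA
  let vidx := ((PySem.List.enumerate rm).filter (fun ip => decide (ip.2 ∈ pvVowelsA))).map (·.1)
  if PySem.List.len vidx ≤ 1 then syl ++ [w]
  else
    let syl2 := (vidx.foldl
      (fun (st : Int × List (List String)) v =>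
        (v + 1, st.2 ++ [PySem.List.slice w (some st.1) (some (v + 1))]))
      (0, syl)).2
    if PySem.List.pyGetD vidx (-1) 0 < PySem.List.len w - 1 then
      syl2.dropLast ++ [(PySem.List.pyGetD syl2 (-1) []) ++
        PySem.List.slice w (some (PySem.List.pyGetD vidx (-1) 0 + 1)) none]
    else syl2

def search_syllable_index (phones : List String) : List Int :=
  let phones := phones.map (fun p => p)   -- [str(phone) for phone in phones]: str is identity on str
  let syl := (pvWordsA phones).foldl pvWordA []
  let lens := syl.map PySem.List.len
  (PySem.List.pyRange 0 (PySem.List.len lens)).map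
    (fun i => (PySem.List.slice lens none (some i)).sum)

-- ===== PORT B =====
def pvVowelSetB : PySem.Set String :=
  PySem.Set.ofList
    ["AO", "UW", "EH", "AH", "AA", "IY", "IH", "UH", "AE", "AW", "AY", "ER", "EY", "OW", "OY"]

-- B: p[:-1] if p[-1:].isdigit() else p
def pvStripB (p : String) : String :=
  if PySem.Str.strIsdigit (PySem.Str.slice p (some (-1)) none) then
    PySem.Str.slice p none (some (-1))
  else p

def search_syllable_index_alt (phones : List String) : List Int :=
  let phones := phones.map (fun p => p)   -- [str(p) for p in phones]: str is identity on str
  let n := phones.length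
  if n = 0 then []
  else
    let bounds := ((PySem.List.enumerate phones).filter (fun ip => ip.2 == "11")).map (·.1)
    (List.zip ((0 : Int) :: bounds) (bounds ++ [(n : Int)])).foldl
      (fun out ab =>
        let vpos := (PySem.List.pyRange ab.1 ab.2).filter
          (fun i => PySem.Set.contains pvVowelSetB (pvStripB (PySem.List.pyGetD phones i "")))
        out ++ [ab.1] ++ (PySem.List.slice vpos none (some (-1))).map (· + 1))
      []

-- ===== PRECONDITION & SPEC =====
def Spec_search_syllable_index (phones : List String) (out : List Int) : Prop := out = search_syllable_index_alt phones
instance (phones : List String) (out : List Int) : Decidable (Spec_search_syllable_index phones out) := by unfold Spec_search_syllable_index; infer_instance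

-- ===== CLAIM (what is proved, stated in full; the proofs are below) =====
def Claim_equal_search_syllable_index : Prop := ∀ (phones : List String), Dom_search_syllable_index phones → Spec_search_syllable_index phones (search_syllable_index phones)

-- ===== LEMMAS AND PROOFS =====

-- positions (0-based) of the elements of a list satisfying f
def pvIdxs (f : String → Bool) : List String → List Nat
  | [] => []
  | x :: xs => (if f x then [0] else []) ++ (pvIdxs f xs).map (· + 1)

-- the word-boundary pairs zip([a]+bs, bs+[n])
def pvChain (a : Nat) : List Nat → Nat → List (Nat × Nat)
  | [], n => [(a, n)]
  | b :: bs, n => (a, b) :: pvChain b bs n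

-- running prefix sums: pvP c [l0,l1,...] = [c, c+l0, c+l0+l1, ...] (one entry per element)
def pvP (c : Int) : List Nat → List Int
  | [] => []
  | l :: ls => c :: pvP (c + (l : Int)) ls

-- the pieces A's inner syllable fold produces for vowel positions vs, cursor c
def pvFP (w : List String) (c : Nat) : List Nat → List (List String)
  | [] => []
  | v :: vs => (w.drop c).take (v + 1 - c) :: pvFP w (v + 1) vs

def pvPred (p : String) : Bool := decide (pvRmDigitA p ∈ pvVowelsA)

-- the syllable pieces A appends for one word
def pvPieces (w : List String) : List (List String) :=
  let vn := pvIdxs pvPred w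
  if vn.length ≤ 1 then [w]
  else
    let ps := pvFP w 0 vn
    if vn.getLastD 0 + 1 < w.length then
      ps.dropLast ++ [ps.getLastD [] ++ w.drop (vn.getLastD 0 + 1)]
    else ps

-- piece lengths of A's inner fold: successive differences of the vowel positions
def pvDiffs (c : Nat) : List Nat → List Nat
  | [] => []
  | v :: vs => (v + 1 - c) :: pvDiffs (v + 1) vs

theorem pvIdxs_lt (f : String → Bool) (l : List String) (k : Nat) (h : k ∈ pvIdxs f l) :
    k < l.length := by
  induction l generalizing k with
  | nil => simp [pvIdxs] at h
  | cons x xs ih =>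
    simp only [pvIdxs, List.mem_append, List.mem_map, List.length_cons] at h ⊢
    rcases h with h | ⟨a, ha, rfl⟩
    · split at h
      · simp at h; omega
      · simp at h
    · have := ih a ha; omega

theorem pvIdxs_sorted (f : String → Bool) (l : List String) :
    (pvIdxs f l).Pairwise (· < ·) := by
  induction l with
  | nil => simp [pvIdxs]
  | cons x xs ih =>
    simp only [pvIdxs]
    apply List.pairwise_append.2
    refine ⟨?_, List.Pairwise.map _ (fun a b hab => by omega) ih, ?_⟩
    · split <;> simp
    · intro a ha b hb
      split at ha
      · simp at ha; subst ha
        simp only [List.mem_map] at hb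
        obtain ⟨c, _, rfl⟩ := hb; omega
      · simp at ha

theorem pvIdxs_map (f : String → Bool) (g : String → String) (l : List String) :
    pvIdxs f (l.map g) = pvIdxs (fun x => f (g x)) l := by
  induction l with
  | nil => rfl
  | cons x xs ih => simp only [List.map, pvIdxs, ih]

-- enumerate-filter comprehension = pvIdxs
theorem pvEnumFilter (g : String → Bool) (l : List String) (s : Int) :
    ((PySem.List.enumerate l s).filter (fun ip => g ip.2)).map (·.1)
      = (pvIdxs g l).map (fun (k : Nat) => s + (k : Int)) := by
  induction l generalizing s with
  | nil => simp [pvIdxs, PySem.List.enumerate]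
  | cons x xs ih =>
    rw [PySem.List.enumerate_cons]
    by_cases hx : g x
    · rw [List.filter_cons_of_pos (by simpa using hx), List.map_cons, ih (s + 1)]
      simp only [pvIdxs, hx, if_pos, List.map_append, List.map_map, List.map_cons,
        List.map_nil, List.singleton_append]
      refine List.cons_eq_cons.2 ⟨by simp, List.map_congr_left fun a _ => by simp [Function.comp]; omega⟩
    · rw [List.filter_cons_of_neg (by simpa using hx), ih (s + 1)]
      simp only [pvIdxs, hx, if_neg, Bool.false_eq_true, not_false_iff, List.nil_append,
        List.map_map]
      exact List.map_congr_left fun a _ => by simp [Function.comp]; omega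

-- range-filter comprehension = pvIdxs
theorem pvRangeFilter (g : String → Bool) (l : List String) :
    (List.range l.length).filter (fun k => g (l.getD k "")) = pvIdxs g l := by
  induction l with
  | nil => simp [pvIdxs]
  | cons x xs ih =>
    rw [List.length_cons, List.range_succ_eq_map, List.filter_cons]
    simp only [List.getD_cons_zero, List.filter_map]
    have hcomp : ((fun k => g ((x :: xs).getD k "")) ∘ Nat.succ) = fun k => g (xs.getD k "") := by
      funext k; simp
    rw [hcomp, ih]
    have hsucc : List.map Nat.succ (pvIdxs g xs) = (pvIdxs g xs).map (· + 1) := by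
      apply List.map_congr_left; intro a _; omega
    by_cases hx : g x
    · simp [pvIdxs, hx, hsucc]
    · simp [pvIdxs, hx, hsucc]

theorem pvStrip_eq (p : String) : pvStripB p = pvRmDigitA p := by
  unfold pvStripB pvRmDigitA
  rw [PySem.Str.strIsdigit_eq, PySem.Str.toList_slice, PySem.Chars.slice_eq_listSlice,
    PySem.List.slice_from_neg_one, PySem.Str.len_eq, PySem.Str.pyGet?_eq,
    PySem.Chars.pyGet?_eq_listPyGet?, PySem.List.pyGet?_neg_one]
  rcases List.eq_nil_or_concat p.toList with h | ⟨l, c, h⟩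
  · rw [h]
    simp [PySem.Chars.strIsdigit]
  · rw [List.concat_eq_append] at h
    rw [h]
    have hdrop : List.drop ((l ++ [c]).length - 1) (l ++ [c]) = [c] := by
      simp [List.length_append]
    rw [hdrop, List.getLast?_concat]
    have hlen : (0 : Int) < ((l ++ [c]).length : Int) := by
      have : 0 < (l ++ [c]).length := by simp
      exact_mod_cast this
    rw [if_pos hlen]

theorem pvPredB_eq (p : String) :
    PySem.Set.contains pvVowelSetB (pvStripB p) = pvPred p := by
  rw [pvStrip_eq]
  unfold pvPred pvVowelSetB pvVowelsA
  rw [PySem.Set.contains_eq_listContains,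
    show PySem.Set.ofList ["AO", "UW", "EH", "AH", "AA", "IY", "IH", "UH", "AE", "AW",
      "AY", "ER", "EY", "OW", "OY"] = ["AO", "UW", "EH", "AH", "AA", "IY", "IH", "UH",
      "AE", "AW", "AY", "ER", "EY", "OW", "OY"] from by decide,
    List.contains_eq_mem]

-- A's word-clustering fold produces the pvChain segments
theorem pvWordsA_aux (phones : List String) (suf : List String) (i start : Nat) (acc : List (List String))
    (hne : suf ≠ []) (hlen : i + suf.length = phones.length) :
    ((PySem.List.enumerate suf (i : Int)).foldl (pvBodyA phones) (((start : Int)), acc)).2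
      = acc ++ (pvChain start ((pvIdxs (fun p => decide (p = "11")) suf).map (· + i)) phones.length).map
          (fun ab => (phones.drop ab.1).take (ab.2 - ab.1)) := by
  induction suf generalizing i start acc with
  | nil => exact absurd rfl hne
  | cons x suf ih =>
    have hshift : ∀ (l : List Nat) (j : Nat), (l.map (· + 1)).map (· + j) = l.map (· + (j + 1)) := by
      intro l j
      rw [List.map_map]
      exact List.map_congr_left fun a _ => by simp [Function.comp]; omega
    rw [PySem.List.enumerate_cons, List.foldl_cons]
    simp only [List.length_cons] at hlen
    rcases eq_or_ne suf [] with rfl | hsuf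
    · have hi : (i : Int) = PySem.List.len phones - 1 := by
        rw [PySem.List.len_eq]; simp only [List.length_nil] at hlen; omega
      by_cases hx : x = "11"
      · simp only [pvBodyA]
        rw [if_pos hx]
        try dsimp only
        rw [if_pos hi]
        simp only [PySem.List.enumerate_nil, List.foldl_nil]
        simp only [pvIdxs, hx, decide_true, if_pos, List.map_nil, List.map_cons,
          List.map_append, List.nil_append, List.append_nil, Nat.zero_add, pvChain,
          PySem.List.slice_natCast, PySem.List.slice_from_natCast,
          List.take_of_length_le (show (phones.drop i).length ≤ phones.length - i by simp),
          List.append_assoc]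
        rfl
      · simp only [pvBodyA]
        rw [if_neg hx]
        try dsimp only
        rw [if_pos hi]
        simp only [PySem.List.enumerate_nil, List.foldl_nil]
        have hxd : (decide (x = "11")) = false := by simp [hx]
        simp only [pvIdxs, hxd, Bool.false_eq_true, if_false, List.map_nil, List.nil_append,
          List.map_append, pvChain, List.map_cons, PySem.List.slice_from_natCast,
          List.take_of_length_le (show (phones.drop start).length ≤ phones.length - start by simp),
          List.append_assoc]
        try simp [pvChain,
          List.take_of_length_le (show (phones.drop start).length ≤ phones.length - start by simp)]
    · have hi : ¬ ((i : Int) = PySem.List.len phones - 1) := by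
        rw [PySem.List.len_eq]
        have hpos : 0 < suf.length := List.length_pos_of_ne_nil hsuf
        omega
      have hcast : ((i : Int) + 1) = ((i + 1 : Nat) : Int) := by push_cast; ring
      by_cases hx : x = "11"
      · simp only [pvBodyA]
        rw [if_pos hx]
        try dsimp only
        rw [if_neg hi]
        rw [hcast, ih (i + 1) i (acc ++ [PySem.List.slice phones (some (start : Int)) (some (i : Int))])
          hsuf (by omega)]
        simp only [pvIdxs, hx, decide_true, if_pos, List.map_cons, List.map_append,
          List.nil_append, Nat.zero_add, hshift, pvChain, List.map_nil,
          PySem.List.slice_natCast, List.append_assoc, List.singleton_append]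
        try simp [pvChain, PySem.List.slice_natCast, List.append_assoc]
      · simp only [pvBodyA]
        rw [if_neg hx]
        try dsimp only
        rw [if_neg hi]
        rw [hcast, ih (i + 1) start acc hsuf (by omega)]
        have hxd : (decide (x = "11")) = false := by simp [hx]
        simp only [pvIdxs, hxd, Bool.false_eq_true, if_false, List.nil_append, hshift]

theorem pvWordsA_eq (phones : List String) (h : phones ≠ []) :
    pvWordsA phones
      = (pvChain 0 (pvIdxs (fun p => decide (p = "11")) phones) phones.length).map
          (fun ab => (phones.drop ab.1).take (ab.2 - ab.1)) := by
  unfold pvWordsA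
  have := pvWordsA_aux phones phones 0 0 [] h (by simp)
  simp only [Nat.cast_zero] at this
  rw [this]
  simp only [List.nil_append]
  have h0 : (pvIdxs (fun p => decide (p = "11")) phones).map (· + 0)
      = pvIdxs (fun p => decide (p = "11")) phones := by simp
  rw [h0]


-- A's inner syllable fold = pvFP
theorem pvFP_fold (w : List String) (vs : List Nat) (c : Nat) (syl : List (List String)) :
    ((vs.map (fun (k : Nat) => (k : Int))).foldl
      (fun (st : Int × List (List String)) v =>
        (v + 1, st.2 ++ [PySem.List.slice w (some st.1) (some (v + 1))]))
      (((c : Int)), syl)).2 = syl ++ pvFP w c vs := by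
  induction vs generalizing c syl with
  | nil => simp [pvFP]
  | cons v vs ih =>
    have h2 : ((v : Int) + 1) = ((v + 1 : Nat) : Int) := by push_cast; ring
    simp only [List.map_cons, List.foldl_cons]
    rw [show (PySem.List.slice w (some (c : Int)) (some ((v : Int) + 1)))
        = (w.drop c).take (v + 1 - c) from by rw [h2, PySem.List.slice_natCast]]
    rw [h2, ih (v + 1) (syl ++ [(w.drop c).take (v + 1 - c)])]
    simp [pvFP]

theorem pvFP_length (w : List String) (vs : List Nat) (c : Nat) :
    (pvFP w c vs).length = vs.length := by
  induction vs generalizing c with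
  | nil => rfl
  | cons v vs ih => simp [pvFP, ih]

-- A's per-word body appends pvPieces
theorem pvWordA_eq (syl : List (List String)) (w : List String) :
    pvWordA syl w = syl ++ pvPieces w := by
  unfold pvWordA pvPieces
  dsimp only
  rw [pvEnumFilter (fun p => decide (p ∈ pvVowelsA)) (w.map pvRmDigitA) 0, pvIdxs_map]
  rw [show (List.map (fun (k : Nat) => (0 : Int) + (k : Int))
      (pvIdxs (fun x => decide (pvRmDigitA x ∈ pvVowelsA)) w))
      = (pvIdxs pvPred w).map (fun (k : Nat) => (k : Int)) from
    List.map_congr_left fun a _ => by simp]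
  simp only [PySem.List.len_eq, List.length_map]
  rw [if_congr (by exact_mod_cast Iff.rfl :
    ((((pvIdxs pvPred w).length : Int)) ≤ 1 ↔ (pvIdxs pvPred w).length ≤ 1)) rfl rfl]
  by_cases h1 : (pvIdxs pvPred w).length ≤ 1
  · rw [if_pos h1, if_pos h1]
  · rw [if_neg h1, if_neg h1]
    have hne : pvIdxs pvPred w ≠ [] := by intro h; rw [h] at h1; simp at h1
    obtain ⟨u, vl, hu⟩ : ∃ u vl, pvIdxs pvPred w = u ++ [vl] := by
      rcases List.eq_nil_or_concat (pvIdxs pvPred w) with h | ⟨u, vl, h⟩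
      · exact absurd h hne
      · exact ⟨u, vl, by simpa [List.concat_eq_append] using h⟩
    rw [hu]
    have hfold := pvFP_fold w (u ++ [vl]) 0 syl
    simp only [Nat.cast_zero] at hfold
    rw [hfold]
    obtain ⟨q, z, hps⟩ : ∃ q z, pvFP w 0 (u ++ [vl]) = q ++ [z] := by
      rcases List.eq_nil_or_concat (pvFP w 0 (u ++ [vl])) with h | ⟨q, z, h⟩
      · exfalso
        have := pvFP_length w (u ++ [vl]) 0
        rw [h] at this; simp at this
      · exact ⟨q, z, by simpa [List.concat_eq_append] using h⟩
    have hg1 : PySem.List.pyGetD (List.map (fun (k : Nat) => (k : Int)) (u ++ [vl])) (-1) 0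
        = (vl : Int) := by
      simp only [List.map_append, List.map_cons, List.map_nil]
      exact PySem.List.pyGetD_neg_one_append_singleton _ _ _
    have hg2 : PySem.List.pyGetD (syl ++ pvFP w 0 (u ++ [vl])) (-1) [] = z := by
      rw [hps, ← List.append_assoc]
      exact PySem.List.pyGetD_neg_one_append_singleton _ _ _
    have hdl : (syl ++ pvFP w 0 (u ++ [vl])).dropLast = syl ++ q := by
      rw [hps, ← List.append_assoc, List.dropLast_concat]
    rw [hg1, hg2, hdl]
    split <;> rename_i hC
    · rw [if_pos (show (u ++ [vl]).getLastD 0 + 1 < w.length by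
        rw [List.getLastD_concat]; omega)]
      rw [hps, List.dropLast_concat, List.getLastD_concat, List.getLastD_concat]
      rw [show ((vl : Int) + 1) = ((vl + 1 : Nat) : Int) from by push_cast; ring]
      try rw [PySem.List.slice_from_natCast]
      try rw [List.append_assoc]
    · rw [if_neg (show ¬ ((u ++ [vl]).getLastD 0 + 1 < w.length) by
        rw [List.getLastD_concat]; omega)]

theorem pvP_append (c : Int) (L1 L2 : List Nat) :
    pvP c (L1 ++ L2) = pvP c L1 ++ pvP (c + (L1.sum : Int)) L2 := by
  induction L1 generalizing c with
  | nil => simp [pvP]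
  | cons l ls ih =>
    simp only [List.cons_append, pvP, ih, List.sum_cons]
    congr 2
    push_cast; ring

theorem pvP_eq_range (c : Int) (L : List Nat) :
    pvP c L = (List.range L.length).map (fun k => c + ((L.take k).sum : Int)) := by
  induction L generalizing c with
  | nil => simp [pvP]
  | cons l ls ih =>
    rw [pvP, List.length_cons, List.range_succ_eq_map, List.map_cons, ih]
    simp only [List.map_map]
    refine List.cons_eq_cons.2 ⟨by simp, ?_⟩
    apply List.map_congr_left; intro a _
    simp only [Function.comp, List.take_succ_cons, List.sum_cons]
    push_cast; ring

-- lengths of the pieces of A's inner fold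
theorem pvFP_map_length (w : List String) (vs : List Nat) (c : Nat)
    (hlt : ∀ v ∈ vs, v < w.length) (hc : ∀ v ∈ vs, c ≤ v + 1) (hs : vs.Pairwise (· < ·)) :
    ((pvFP w c vs).map List.length) = pvDiffs c vs := by
  induction vs generalizing c with
  | nil => rfl
  | cons v vs ih =>
    simp only [pvFP, List.map_cons, pvDiffs]
    refine List.cons_eq_cons.2 ⟨?_, ?_⟩
    · have h1 := hlt v (by simp)
      have h2 := hc v (by simp)
      simp only [List.length_take, List.length_drop]
      omega
    · exact ih (v + 1) (fun x hx => hlt x (by simp [hx]))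
        (fun x hx => by have := (List.pairwise_cons.1 hs).1 x hx; omega)
        (List.pairwise_cons.1 hs).2

theorem pvDiffs_sum (vs : List Nat) (c : Nat) (hne : vs ≠ [])
    (hc : ∀ v ∈ vs, c ≤ v + 1) (hs : vs.Pairwise (· < ·)) :
    (pvDiffs c vs).sum + c = vs.getLastD 0 + 1 := by
  induction vs generalizing c with
  | nil => exact absurd rfl hne
  | cons v vs ih =>
    rcases eq_or_ne vs [] with rfl | hvs
    · have := hc v (by simp)
      simp only [pvDiffs, List.sum_cons, List.sum_nil, List.getLastD_cons, List.getLastD_nil]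
      omega
    · have hcv := hc v (by simp)
      have ihv := ih (v + 1) hvs
        (fun x hx => by have := (List.pairwise_cons.1 hs).1 x hx; omega)
        (List.pairwise_cons.1 hs).2
      obtain ⟨y, hy⟩ : ∃ y, vs.getLast? = some y := by
        cases h : vs.getLast? with
        | none => exact absurd (List.getLast?_eq_none_iff.1 h) hvs
        | some y => exact ⟨y, rfl⟩
      simp only [pvDiffs, List.sum_cons, List.getLastD_cons]
      rw [List.getLastD_eq_getLast?, hy] at ihv ⊢
      simp only [Option.getD_some] at ihv ⊢
      omega

theorem pvP_pvDiffs (a : Int) (vs : List Nat) (c : Nat) (hne : vs ≠ [])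
    (hc : ∀ v ∈ vs, c ≤ v + 1) (hs : vs.Pairwise (· < ·)) :
    pvP (a + (c : Int)) (pvDiffs c vs)
      = (a + (c : Int)) :: vs.dropLast.map (fun (v : Nat) => a + (v : Int) + 1) := by
  induction vs generalizing c with
  | nil => exact absurd rfl hne
  | cons v vs ih =>
    have hcv := hc v (by simp)
    have h3 : a + (c : Int) + ((v + 1 - c : Nat) : Int) = a + ((v + 1 : Nat) : Int) := by omega
    rcases eq_or_ne vs [] with rfl | hvs
    · simp [pvDiffs, pvP]
    · simp only [pvDiffs, pvP, h3]
      rw [ih (v + 1) hvs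
        (fun x hx => by have := (List.pairwise_cons.1 hs).1 x hx; omega)
        (List.pairwise_cons.1 hs).2]
      rw [List.dropLast_cons_of_ne_nil hvs, List.map_cons]
      refine List.cons_eq_cons.2 ⟨rfl, List.cons_eq_cons.2 ⟨by push_cast; ring, rfl⟩⟩

-- per-word facts: total length and the prefix-sum outputs
theorem pvPieces_sum (w : List String) :
    (((pvPieces w).map List.length).sum) = w.length := by
  unfold pvPieces
  by_cases h1 : (pvIdxs pvPred w).length ≤ 1
  · rw [if_pos h1]; simp
  · rw [if_neg h1]
    have hne : pvIdxs pvPred w ≠ [] := by intro h; rw [h] at h1; simp at h1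
    have hlt : ∀ v ∈ pvIdxs pvPred w, v < w.length := fun v hv => pvIdxs_lt _ _ _ hv
    have hs := pvIdxs_sorted pvPred w
    have hc : ∀ v ∈ pvIdxs pvPred w, 0 ≤ v + 1 := fun v _ => Nat.zero_le _
    have hM : (pvFP w 0 (pvIdxs pvPred w)).map List.length = pvDiffs 0 (pvIdxs pvPred w) :=
      pvFP_map_length w _ 0 hlt hc hs
    have hsum := pvDiffs_sum (pvIdxs pvPred w) 0 hne hc hs
    have hvl : (pvIdxs pvPred w).getLastD 0 < w.length := by
      obtain ⟨u, vl, hu⟩ : ∃ u vl, pvIdxs pvPred w = u ++ [vl] := by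
        rcases List.eq_nil_or_concat (pvIdxs pvPred w) with h | ⟨u, vl, h⟩
        · exact absurd h hne
        · exact ⟨u, vl, by simpa [List.concat_eq_append] using h⟩
      rw [hu, List.getLastD_concat]
      exact hlt vl (by simp [hu])
    obtain ⟨q, z, hps⟩ : ∃ q z, pvFP w 0 (pvIdxs pvPred w) = q ++ [z] := by
      rcases List.eq_nil_or_concat (pvFP w 0 (pvIdxs pvPred w)) with h | ⟨q, z, h⟩
      · exfalso
        have := pvFP_length w (pvIdxs pvPred w) 0
        rw [h] at this; simp at this; omega
      · exact ⟨q, z, by simpa [List.concat_eq_append] using h⟩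
    rw [hps] at hM
    split
    · rename_i hext
      dsimp only
      rw [hps, List.dropLast_concat, List.getLastD_concat]
      have hMsum : ((q ++ [z]).map List.length).sum + 0 = (pvIdxs pvPred w).getLastD 0 + 1 := by
        rw [hM]; exact hsum
      simp only [List.map_append, List.map_cons, List.map_nil, List.sum_append,
        List.sum_cons, List.sum_nil, List.length_append, List.length_drop] at hMsum ⊢
      omega
    · rename_i hext
      have hMsum : ((q ++ [z]).map List.length).sum + 0 = (pvIdxs pvPred w).getLastD 0 + 1 := by
        rw [hM]; exact hsum
      dsimp only
      rw [hps]
      simp only [List.map_append, List.map_cons, List.map_nil, List.sum_append,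
        List.sum_cons, List.sum_nil] at hMsum ⊢
      omega

theorem pvPieces_pvP (w : List String) (a : Nat) :
    pvP (a : Int) ((pvPieces w).map List.length)
      = (a : Int) :: ((pvIdxs pvPred w).dropLast).map (fun (v : Nat) => (a : Int) + (v : Int) + 1) := by
  unfold pvPieces
  by_cases h1 : (pvIdxs pvPred w).length ≤ 1
  · rw [if_pos h1]
    have hdl : (pvIdxs pvPred w).dropLast = [] := by
      rcases hv : pvIdxs pvPred w with _ | ⟨x, _ | ⟨y, t⟩⟩
      · rfl
      · rfl
      · rw [hv] at h1; simp at h1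
    rw [hdl]
    simp [pvP]
  · rw [if_neg h1]
    have hne : pvIdxs pvPred w ≠ [] := by intro h; rw [h] at h1; simp at h1
    have hlt : ∀ v ∈ pvIdxs pvPred w, v < w.length := fun v hv => pvIdxs_lt _ _ _ hv
    have hs := pvIdxs_sorted pvPred w
    have hc : ∀ v ∈ pvIdxs pvPred w, 0 ≤ v + 1 := fun v _ => Nat.zero_le _
    have hM : (pvFP w 0 (pvIdxs pvPred w)).map List.length = pvDiffs 0 (pvIdxs pvPred w) :=
      pvFP_map_length w _ 0 hlt hc hs
    have key : pvP (a : Int) ((pvFP w 0 (pvIdxs pvPred w)).map List.length)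
        = (a : Int) :: ((pvIdxs pvPred w).dropLast).map (fun (v : Nat) => (a : Int) + (v : Int) + 1) := by
      rw [hM]
      have := pvP_pvDiffs (a : Int) (pvIdxs pvPred w) 0 hne hc hs
      simpa using this
    split
    · obtain ⟨q, z, hps⟩ : ∃ q z, pvFP w 0 (pvIdxs pvPred w) = q ++ [z] := by
        rcases List.eq_nil_or_concat (pvFP w 0 (pvIdxs pvPred w)) with h | ⟨q, z, h⟩
        · exfalso
          have := pvFP_length w (pvIdxs pvPred w) 0
          rw [h] at this; simp at this; omega
        · exact ⟨q, z, by simpa [List.concat_eq_append] using h⟩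
      dsimp only
      rw [hps] at key ⊢
      rw [List.dropLast_concat, List.getLastD_concat]
      have e1 : ∀ (x : List String), pvP (a : Int) ((q ++ [x]).map List.length)
          = pvP (a : Int) (q.map List.length)
            ++ [(a : Int) + (((q.map List.length).sum : Nat) : Int)] := by
        intro x
        rw [List.map_append, pvP_append]
        rfl
      rw [e1] at key ⊢
      exact key
    · exact key


-- B's zip of boundaries = pvChain
theorem pvZip_chain (n : Nat) (bs : List Nat) (a : Nat) :
    List.zip ((a : Int) :: bs.map (fun (k : Nat) => (k : Int))) (bs.map (fun (k : Nat) => (k : Int)) ++ [(n : Int)])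
      = (pvChain a bs n).map (fun ab => ((ab.1 : Int), (ab.2 : Int))) := by
  induction bs generalizing a with
  | nil => simp [pvChain]
  | cons b bs ih => simp only [List.map_cons, List.cons_append, List.zip_cons_cons, pvChain, ih]

theorem pvChain_bounds (bs : List Nat) (a n : Nat) (ha : a ≤ n)
    (hb : ∀ b ∈ bs, a ≤ b ∧ b < n) (hs : bs.Pairwise (· < ·)) :
    ∀ p ∈ pvChain a bs n, p.1 ≤ p.2 ∧ p.2 ≤ n := by
  induction bs generalizing a with
  | nil => intro p hp; simp [pvChain] at hp; simp [hp]; omega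
  | cons b bs ih =>
    intro p hp
    simp only [pvChain, List.mem_cons] at hp
    rcases hp with rfl | hp
    · have := hb b (by simp); simp; omega
    · exact ih b (by have := hb b (by simp); omega)
        (fun x hx => ⟨by have := (List.pairwise_cons.1 hs).1 x hx; omega,
          (hb x (by simp [hx])).2⟩)
        (List.pairwise_cons.1 hs).2 p hp

-- B's emit loop as a flatMap
theorem pvFoldB (f : Int × Int → List Int) (l : List (Int × Int)) (acc : List Int) :
    l.foldl (fun out ab => out ++ [ab.1] ++ f ab) acc
      = acc ++ l.flatMap (fun ab => ab.1 :: f ab) := by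
  induction l generalizing acc with
  | nil => simp
  | cons p l ih => rw [List.foldl_cons, ih, List.flatMap_cons]; simp [List.append_assoc]

-- B's per-pair output in canonical form
theorem pvPairB (phones : List String) (a b : Nat) (hab : a ≤ b) (hbn : b ≤ phones.length) :
    [((a : Nat) : Int)] ++ (PySem.List.slice ((PySem.List.pyRange (a : Int) (b : Int)).filter
        (fun i => PySem.Set.contains pvVowelSetB (pvStripB (PySem.List.pyGetD phones i ""))))
        none (some (-1))).map (· + 1)
      = (a : Int) :: ((pvIdxs pvPred ((phones.drop a).take (b - a))).dropLast).map
          (fun (v : Nat) => (a : Int) + (v : Int) + 1) := by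
  have hrange : PySem.List.pyRange (a : Int) (b : Int)
      = (List.range (b - a)).map (fun (k : Nat) => (a : Int) + (k : Int)) := by
    rw [PySem.List.pyRange_one,
      show (((b : Int)) - ((a : Int))).toNat = b - a from by omega]
  rw [hrange, List.filter_map]
  have hwlen : ((phones.drop a).take (b - a)).length = b - a := by
    rw [List.length_take, List.length_drop]; omega
  have hfc : List.filter ((fun i => PySem.Set.contains pvVowelSetB
        (pvStripB (PySem.List.pyGetD phones i ""))) ∘ (fun (k : Nat) => (a : Int) + (k : Int)))
        (List.range (b - a))
      = pvIdxs pvPred ((phones.drop a).take (b - a)) := by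
    have hrf := pvRangeFilter pvPred ((phones.drop a).take (b - a))
    rw [hwlen] at hrf
    rw [← hrf]
    apply List.filter_congr
    intro k hk
    rw [List.mem_range] at hk
    simp only [Function.comp]
    rw [show ((a : Int) + (k : Int)) = ((a + k : Nat) : Int) from by push_cast; ring,
      PySem.List.pyGetD_natCast, pvPredB_eq]
    have hget : ((phones.drop a).take (b - a)).getD k "" = phones.getD (a + k) "" := by
      rw [List.getD_eq_getElem?_getD, List.getD_eq_getElem?_getD,
        List.getElem?_take_of_lt hk, List.getElem?_drop]
    rw [hget]
  rw [hfc, PySem.List.slice_to_neg_one, ← List.map_dropLast, List.map_map,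
    List.singleton_append]
  exact List.cons_eq_cons.2 ⟨rfl, List.map_congr_left fun v _ => rfl⟩

-- A's closing prefix-sum comprehension is pvP 0
theorem pvPS (L : List Nat) :
    (PySem.List.pyRange 0 ((L.length : Int))).map
      (fun i => (PySem.List.slice (L.map (fun (k : Nat) => (k : Int))) none (some i)).sum)
      = pvP 0 L := by
  rw [PySem.List.pyRange_one, pvP_eq_range]
  rw [show (((L.length : Int)) - 0).toNat = L.length from by omega, List.map_map]
  apply List.map_congr_left
  intro k hk
  simp only [Function.comp]
  rw [show ((0 : Int) + (k : Int)) = ((k : Nat) : Int) from by omega,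
    PySem.List.slice_to_natCast, ← List.map_take, ← Nat.cast_list_sum]
  omega

-- the main induction over word-boundary chains
theorem pvMain (phones : List String) (bs : List Nat) (a : Nat)
    (ha : a ≤ phones.length) (hb : ∀ b ∈ bs, a ≤ b ∧ b < phones.length)
    (hs : bs.Pairwise (· < ·)) :
    pvP (a : Int) (((pvChain a bs phones.length).flatMap
        (fun ab => pvPieces ((phones.drop ab.1).take (ab.2 - ab.1)))).map List.length)
      = (pvChain a bs phones.length).flatMap
          (fun ab => (ab.1 : Int) ::
            ((pvIdxs pvPred ((phones.drop ab.1).take (ab.2 - ab.1))).dropLast).map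
              (fun (v : Nat) => (ab.1 : Int) + (v : Int) + 1)) := by
  induction bs generalizing a with
  | nil =>
    simp only [pvChain, List.flatMap_cons, List.flatMap_nil, List.append_nil]
    exact pvPieces_pvP _ a
  | cons b bs ih =>
    simp only [pvChain, List.flatMap_cons, List.map_append]
    rw [pvP_append]
    have hab := hb b (by simp)
    have hw : (((pvPieces ((phones.drop a).take (b - a))).map List.length).sum) = b - a := by
      rw [pvPieces_sum]
      simp [List.length_take, List.length_drop]
      omega
    rw [show ((a : Int) + ((((pvPieces ((phones.drop a).take (b - a))).map List.length).sum : Nat) : Int))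
        = ((b : Nat) : Int) from by rw [hw]; omega]
    rw [ih b (by omega)
      (fun x hx => ⟨by have := (List.pairwise_cons.1 hs).1 x hx; omega,
        (hb x (by simp [hx])).2⟩)
      (List.pairwise_cons.1 hs).2]
    rw [pvPieces_pvP]

-- ===== VERDICT (by name: the statement is the Claim_ definition above) =====
theorem search_syllable_index_spec : Claim_equal_search_syllable_index := by
  unfold Claim_equal_search_syllable_index Spec_search_syllable_index
  intro phones _
  rcases eq_or_ne phones [] with rfl | hne
  · rfl
  · have hn0 : ¬ (phones.length = 0) := fun h => hne (List.length_eq_zero_iff.1 h)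
    have hbs : ∀ b ∈ pvIdxs (fun p => decide (p = "11")) phones,
        0 ≤ b ∧ b < phones.length := fun b hb => ⟨Nat.zero_le _, pvIdxs_lt _ _ _ hb⟩
    have hss := pvIdxs_sorted (fun p => decide (p = "11")) phones
    unfold search_syllable_index search_syllable_index_alt
    dsimp only
    rw [List.map_id' phones]
    -- ===== A side =====
    rw [show pvWordA = (fun syl w => syl ++ pvPieces w) from
      funext fun sy => funext fun w => pvWordA_eq sy w]
    rw [PySem.List.foldl_append_eq_flatMap, List.nil_append, pvWordsA_eq phones hne]
    rw [show (PySem.List.len : List String → Int) = (fun (s : List String) => ((s.length : Nat) : Int)) from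
      funext fun s => PySem.List.len_eq s]
    rw [show (List.map (fun (s : List String) => ((s.length : Nat) : Int))
        (((pvChain 0 (pvIdxs (fun p => decide (p = "11")) phones) phones.length).map
          (fun ab => (phones.drop ab.1).take (ab.2 - ab.1))).flatMap pvPieces))
        = ((((pvChain 0 (pvIdxs (fun p => decide (p = "11")) phones) phones.length).map
          (fun ab => (phones.drop ab.1).take (ab.2 - ab.1))).flatMap pvPieces).map
            List.length).map (fun (k : Nat) => (k : Int)) from by rw [List.map_map]; rfl]
    rw [PySem.List.len_eq, List.length_map, pvPS]
    rw [List.map_flatMap, List.flatMap_map]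
    have hm := pvMain phones (pvIdxs (fun p => decide (p = "11")) phones) 0
      (Nat.zero_le _) hbs hss
    simp only [Nat.cast_zero] at hm
    rw [List.map_flatMap] at hm
    rw [hm]
    -- ===== B side =====
    rw [if_neg hn0]
    rw [pvEnumFilter (fun p => p == "11") phones 0]
    rw [show (fun (p : String) => p == "11") = (fun p => decide (p = "11")) from
      funext fun p => Bool.beq_eq_decide_eq p "11"]
    rw [show (List.map (fun (k : Nat) => (0 : Int) + (k : Int))
        (pvIdxs (fun p => decide (p = "11")) phones))
        = (pvIdxs (fun p => decide (p = "11")) phones).map (fun (k : Nat) => (k : Int)) from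
      List.map_congr_left fun a _ => by simp]
    have hz := pvZip_chain phones.length (pvIdxs (fun p => decide (p = "11")) phones) 0
    simp only [Nat.cast_zero] at hz
    rw [hz]
    rw [pvFoldB (fun ab => (PySem.List.slice ((PySem.List.pyRange ab.1 ab.2).filter
        (fun i => PySem.Set.contains pvVowelSetB (pvStripB (PySem.List.pyGetD phones i ""))))
        none (some (-1))).map (· + 1))]
    rw [List.nil_append, List.flatMap_map, List.flatMap_def, List.flatMap_def]
    congr 1
    apply List.map_congr_left
    intro p hp
    obtain ⟨h1, h2⟩ := pvChain_bounds (pvIdxs (fun q => decide (q = "11")) phones)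
      0 phones.length (Nat.zero_le _) hbs hss p hp
    dsimp only
    exact (pvPairB phones p.1 p.2 h1 h2).symm
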